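-- pv_equiv track=rewrite | github.com/tzookb/programming-challenges | exercises/leetcode/maximum-length-of-subarray-with-positive-product/sol.py | getCleanedArrsFromZeros
-- ===== SOURCE A (Python) =====
-- from typing import List
--
-- def getCleanedArrsFromZeros(nums: List[int]) -> int:
--     sub_arrs = []
--     cur = []
--     for item in nums:
--
--         if item != 0:
--             cur.append(item)
--         elif cur:
--             sub_arrs.append(cur)
--             cur = []
--     if cur:
--         sub_arrs.append(cur)
--
--     return sub_arrs
-- ===== SOURCE B (Python) =====
-- from itertools import groupby
-- from typing import List
--
-- def getCleanedArrsFromZeros(nums: List[int]) -> List[List[int]]: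
--     # segment nums into maximal runs by the key (x != 0), keep the nonzero runs
--     return [list(g) for k, g in groupby(nums, key=lambda x: x != 0) if k]
-- ===== Notes on version B (the rewrite author's own statement) =====
-- stated objective: idiomatic
-- what changed: Replaces the explicit current-buffer-and-flush accumulator loop with itertools.groupby segmentation by the key (x != 0), keeping only the nonzero runs.
import Mathlib
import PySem

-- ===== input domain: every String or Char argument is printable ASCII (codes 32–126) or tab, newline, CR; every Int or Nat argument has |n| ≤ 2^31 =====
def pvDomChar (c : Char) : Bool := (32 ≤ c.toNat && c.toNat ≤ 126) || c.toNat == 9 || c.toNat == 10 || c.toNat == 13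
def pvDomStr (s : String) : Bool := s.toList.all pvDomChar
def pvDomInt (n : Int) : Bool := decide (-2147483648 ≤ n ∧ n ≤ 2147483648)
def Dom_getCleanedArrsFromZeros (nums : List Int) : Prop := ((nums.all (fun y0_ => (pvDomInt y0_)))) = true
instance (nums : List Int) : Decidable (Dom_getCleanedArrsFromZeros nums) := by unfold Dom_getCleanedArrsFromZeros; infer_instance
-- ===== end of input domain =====

-- B replaces A's buffer-and-flush accumulator loop with groupby-style run segmentation
-- (maximal runs by the key x ≠ 0, keeping the nonzero runs); objective: idiomatic, same cost.

-- ===== PORT A =====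
-- state = (sub_arrs, cur); one fold step per item, final flush of cur
def pvStepA (acc : List (List Int) × List Int) (item : Int) : List (List Int) × List Int :=
  if item ≠ 0 then (acc.1, acc.2 ++ [item])
  else if acc.2 ≠ [] then (acc.1 ++ [acc.2], [])
  else acc

def getCleanedArrsFromZeros (nums : List Int) : List (List Int) :=
  let fin := nums.foldl pvStepA ([], [])
  if fin.2 ≠ [] then fin.1 ++ [fin.2] else fin.1

-- ===== PORT B =====
-- groupby over key (x ≠ 0): each recursive step consumes one maximal run; true-keyed
-- runs are kept (takeWhile materialises the group), false-keyed runs are discarded.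
def getCleanedArrsFromZeros_alt (nums : List Int) : List (List Int) :=
  match nums with
  | [] => []
  | x :: xs =>
    if x ≠ 0 then
      ((x :: xs).takeWhile (· ≠ 0)) :: getCleanedArrsFromZeros_alt ((x :: xs).dropWhile (· ≠ 0))
    else
      getCleanedArrsFromZeros_alt ((x :: xs).dropWhile (· = 0))
termination_by nums.length
decreasing_by
  · simp only [List.dropWhile]
    have := List.length_dropWhile_le (fun y => decide (y ≠ 0)) xs
    split <;> simp_all <;> omega
  · simp only [List.dropWhile]
    have := List.length_dropWhile_le (fun y => decide (y = 0)) xs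
    split <;> simp_all <;> omega

-- ===== PRECONDITION & SPEC =====
def Spec_getCleanedArrsFromZeros (nums : List Int) (out : List (List Int)) : Prop := out = getCleanedArrsFromZeros_alt nums
instance (nums : List Int) (out : List (List Int)) : Decidable (Spec_getCleanedArrsFromZeros nums out) := by unfold Spec_getCleanedArrsFromZeros; infer_instance

-- ===== CLAIM (what is proved, stated in full; the proofs are below) =====
def Claim_equal_getCleanedArrsFromZeros : Prop := ∀ (nums : List Int), Dom_getCleanedArrsFromZeros nums → Spec_getCleanedArrsFromZeros nums (getCleanedArrsFromZeros nums)

-- ===== LEMMAS AND PROOFS =====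

-- reference recursion: what A's fold computes given a pending buffer `cur`
def pvPre (cur : List Int) : List Int → List (List Int)
  | [] => if cur = [] then [] else [cur]
  | x :: xs =>
    if x ≠ 0 then pvPre (cur ++ [x]) xs
    else (if cur = [] then [] else [cur]) ++ pvPre [] xs

theorem pvFoldA (nums : List Int) : ∀ (sub : List (List Int)) (cur : List Int),
    (let fin := nums.foldl pvStepA (sub, cur);
     if fin.2 ≠ [] then fin.1 ++ [fin.2] else fin.1) = sub ++ pvPre cur nums := by
  induction nums with
  | nil =>
    intro sub cur
    simp only [List.foldl, pvPre]
    by_cases h : cur = [] <;> simp [h]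
  | cons x xs ih =>
    intro sub cur
    simp only [List.foldl, pvPre, pvStepA]
    by_cases hx : x = 0
    · by_cases hc : cur = [] <;> simp [hx, hc, ih]
    · simp [hx, ih]

-- a nonempty pending buffer absorbs the leading nonzero run
theorem pvPre_nonempty (nums : List Int) : ∀ (c : List Int), c ≠ [] →
    pvPre c nums = (c ++ nums.takeWhile (· ≠ 0)) :: pvPre [] (nums.dropWhile (· ≠ 0)) := by
  induction nums with
  | nil => intro c hc; simp [pvPre, hc]
  | cons x xs ih =>
    intro c hc
    by_cases hx : x = 0
    · simp [pvPre, hx, hc, List.takeWhile, List.dropWhile]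
    · have h1 : pvPre c (x :: xs) = pvPre (c ++ [x]) xs := by simp [pvPre, hx]
      rw [h1, ih (c ++ [x]) (by simp)]
      simp [List.takeWhile, List.dropWhile, hx]

-- discarding a leading zero-run does not change B's result
theorem pvAltDropZeros : ∀ (xs : List Int),
    getCleanedArrsFromZeros_alt xs = getCleanedArrsFromZeros_alt (xs.dropWhile (· = 0)) := by
  intro xs
  induction xs with
  | nil => rfl
  | cons y ys ihy =>
    by_cases hy : y = 0
    · conv_lhs => rw [getCleanedArrsFromZeros_alt]
      simp only [hy, if_neg (by simp : ¬ (0:Int) ≠ 0)]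
    · simp [List.dropWhile, hy]

theorem pvPre_eq_alt (n : ℕ) : ∀ (nums : List Int), nums.length ≤ n →
    pvPre [] nums = getCleanedArrsFromZeros_alt nums := by
  induction n with
  | zero =>
    intro nums h
    have : nums = [] := List.eq_nil_of_length_eq_zero (Nat.le_zero.mp h)
    subst this; simp [pvPre, getCleanedArrsFromZeros_alt]
  | succ n ih =>
    intro nums h
    match nums with
    | [] => simp [pvPre, getCleanedArrsFromZeros_alt]
    | x :: xs =>
      by_cases hx : x = 0
      · have h1 : pvPre [] (x :: xs) = pvPre [] xs := by simp [pvPre, hx]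
        have hlen : xs.length ≤ n := by simpa using Nat.lt_succ_iff.mp (by simpa using h)
        rw [h1, ih xs hlen]
        conv_rhs => rw [getCleanedArrsFromZeros_alt]
        simp only [hx, if_neg (by simp : ¬ (0:Int) ≠ 0)]
        have h2 : ((0 : Int) :: xs).dropWhile (· = 0) = xs.dropWhile (· = 0) := by
          simp [List.dropWhile]
        rw [h2, pvAltDropZeros xs]
      · have h1 : pvPre [] (x :: xs) = pvPre [x] xs := by simp [pvPre, hx]
        rw [h1, pvPre_nonempty xs [x] (by simp)]
        rw [getCleanedArrsFromZeros_alt]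
        simp only [if_pos (by simp [hx] : x ≠ 0)]
        have ht : ((x :: xs).takeWhile (· ≠ 0)) = x :: xs.takeWhile (· ≠ 0) := by
          simp [List.takeWhile, hx]
        have hd : ((x :: xs).dropWhile (· ≠ 0)) = xs.dropWhile (· ≠ 0) := by
          simp [List.dropWhile, hx]
        rw [ht, hd, ih _ (le_trans (List.length_dropWhile_le _ _) (by simpa using Nat.lt_succ_iff.mp (by simpa using h)))]
        simp

-- ===== VERDICT (by name: the statement is the Claim_ definition above) =====
theorem getCleanedArrsFromZeros_spec : Claim_equal_getCleanedArrsFromZeros := by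
  intro nums _
  unfold Spec_getCleanedArrsFromZeros getCleanedArrsFromZeros
  rw [pvFoldA nums [] []]
  simpa using pvPre_eq_alt nums.length nums le_rfl
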